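-- pv_equiv track=rewrite | github.com/schmidte7/Python_Examples | TP6_4.py | commmonStrings
-- ===== SOURCE A (Python) =====
-- def commmonStrings(A, B, C):
--     result = set() # Create an empty set
--
--     A_lower = set() # Create empty set for list A
--     for e in A: # Iterate through the list
--         A_lower.add(e.lower()) # Add the lowercased words into the set (does not contain duplicates)
--
--     B_lower = set() # Create empty set for list B
--     for e in B: # Iterate through the list
--         B_lower.add(e.lower()) # Add the lowercased words into the set (does not contain duplicates)
--
--     C_lower = set() # Create empty set for list C
--     for e in C: # Iterate through the list
--         C_lower.add(e.lower()) # Add the lowercased words into the set (does not contain duplicates)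
--
--     # Similiar to 5.2 with lists but these are sets
--     # Check what is in A/B or A/C
--     for itemA in A_lower: # Iterate through the new set of words in A_lower
--         if (itemA in B_lower) or (itemA in C_lower): # Compare A_lower to B_lower and A_lower to C_lower (do not need () )
--             result.add(itemA) # Add result of itemA to result (set)
--
--     for itemB in B_lower: # Iterate through the new set of words in B_lower
--         if itemB in C_lower: # Compare B_lower to C_lower
--             result.add(itemB) # Add result of itemB to result (set)
--
--     return result
-- ===== SOURCE B (Python) =====
-- def commmonStrings(A, B, C):
--     counts = {}
--     for lst in (A, B, C):
--         for x in {e.lower() for e in lst}: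
--             counts[x] = counts.get(x, 0) + 1
--     return {x for x in counts if counts[x] >= 2}
-- ===== Notes on version B (the rewrite author's own statement) =====
-- stated objective: alternative
-- what changed: Replaces A's two pairwise-membership loops (A_lower vs B_lower/C_lower, then B_lower vs C_lower) by building one frequency dict over the three lowered deduped sets and returning the keys with count >= 2.
import Mathlib
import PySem

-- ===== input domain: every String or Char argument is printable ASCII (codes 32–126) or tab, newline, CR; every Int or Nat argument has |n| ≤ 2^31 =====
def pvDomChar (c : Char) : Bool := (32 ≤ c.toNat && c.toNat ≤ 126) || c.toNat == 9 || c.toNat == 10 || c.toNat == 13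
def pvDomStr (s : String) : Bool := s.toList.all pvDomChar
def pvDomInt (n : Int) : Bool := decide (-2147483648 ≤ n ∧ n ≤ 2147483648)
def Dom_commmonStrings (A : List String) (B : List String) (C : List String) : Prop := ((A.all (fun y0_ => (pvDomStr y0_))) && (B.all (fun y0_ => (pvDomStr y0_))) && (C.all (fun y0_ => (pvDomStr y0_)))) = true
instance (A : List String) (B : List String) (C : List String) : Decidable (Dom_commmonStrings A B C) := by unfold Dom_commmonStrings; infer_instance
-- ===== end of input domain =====

-- B replaces A's pairwise membership scans by one frequency dict over the three lowered sets, filtered at count ≥ 2 (alternative structure, same cost).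


-- ===== PORT A =====
def commmonStrings (A : List String) (B : List String) (C : List String) : List String :=
  let result : PySem.Set String := PySem.Set.empty
  let Alower : PySem.Set String :=
    A.foldl (fun s e => PySem.Set.add s (PySem.Str.lower e)) PySem.Set.empty
  let Blower : PySem.Set String :=
    B.foldl (fun s e => PySem.Set.add s (PySem.Str.lower e)) PySem.Set.empty
  let Clower : PySem.Set String :=
    C.foldl (fun s e => PySem.Set.add s (PySem.Str.lower e)) PySem.Set.empty
  let result :=
    Alower.foldl (fun r itemA =>
      if PySem.Set.contains Blower itemA || PySem.Set.contains Clower itemA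
      then PySem.Set.add r itemA else r) result
  let result :=
    Blower.foldl (fun r itemB =>
      if PySem.Set.contains Clower itemB
      then PySem.Set.add r itemB else r) result
  result

-- ===== PORT B =====
def commmonStrings_alt (A : List String) (B : List String) (C : List String) : List String :=
  let counts : PySem.Dict String Int :=
    [A, B, C].foldl (fun d lst =>
      (PySem.Set.ofList (lst.map PySem.Str.lower)).foldl
        (fun d x => d.insert x (d.getD x 0 + 1)) d) PySem.Dict.empty
  PySem.Set.ofList (counts.keys.filter (fun x => 2 ≤ counts.getD x 0))

-- ===== PRECONDITION & SPEC =====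
def Spec_commmonStrings (A : List String) (B : List String) (C : List String) (out : List String) : Prop := out = commmonStrings_alt A B C
instance (A : List String) (B : List String) (C : List String) (out : List String) : Decidable (Spec_commmonStrings A B C out) := by unfold Spec_commmonStrings; infer_instance

-- ===== CLAIM (what is proved, stated in full; the proofs are below) =====
def Claim_equal_commmonStrings : Prop := ∀ (A : List String) (B : List String) (C : List String), Dom_commmonStrings A B C → Spec_commmonStrings A B C (commmonStrings A B C)

-- ===== LEMMAS AND PROOFS =====

-- a 'for x in s: if p(x): result.add(x)' loop appends, in order, the new elements of s satisfying p
theorem foldl_add_if_filter {α : Type} [BEq α] [LawfulBEq α] (p : α → Bool) :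
    ∀ (l acc : List α), l.Nodup →
    l.foldl (fun r x => if p x then PySem.Set.add r x else r) acc
      = acc ++ l.filter (fun x => p x && !(acc.contains x)) := by
  intro l
  induction l with
  | nil => intro acc _; simp
  | cons x l ih =>
    intro acc hl
    rw [List.nodup_cons] at hl
    obtain ⟨hx, hl⟩ := hl
    by_cases hp : p x = true
    · by_cases hm : x ∈ acc
      · have hstep : (if p x = true then PySem.Set.add acc x else acc) = acc := by
          rw [if_pos hp, PySem.Set.add_of_mem hm]
        rw [List.foldl_cons, hstep, ih acc hl, List.filter_cons]
        simp [hp, hm]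
      · have hstep : (if p x = true then PySem.Set.add acc x else acc) = acc ++ [x] := by
          rw [if_pos hp, PySem.Set.add_of_not_mem hm]
        rw [List.foldl_cons, hstep, ih (acc ++ [x]) hl]
        have hcong : l.filter (fun y => p y && !((acc ++ [x]).contains y))
            = l.filter (fun y => p y && !(acc.contains y)) := by
          apply List.filter_congr
          intro y hy
          have hne : y ≠ x := fun h => hx (h ▸ hy)
          simp [hne]
        rw [hcong, List.filter_cons]
        simp [hp, hm]
    · rw [List.foldl_cons, if_neg hp, ih acc hl, List.filter_cons]
      simp [hp]

-- an element of a Nodup list occurs exactly once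
theorem count_one {α : Type} [BEq α] [LawfulBEq α] : ∀ (l : List α), l.Nodup → ∀ (x : α), x ∈ l → l.count x = 1 := by
  intro l
  induction l with
  | nil => intro _ x hx; cases hx
  | cons a l ih =>
    intro h x hx
    rw [List.nodup_cons] at h
    rcases List.mem_cons.mp hx with rfl | hm
    · rw [List.count_cons_self, List.count_eq_zero_of_not_mem h.1]
    · have hne : ¬ a = x := fun e => h.1 (e ▸ hm)
      rw [List.count_cons, ih h.2 x hm]
      simp [hne]

-- the two programs' folds agree on arbitrary Nodup lowered sets
theorem core_eq (SA SB SC : List String) (hA : SA.Nodup) (hB : SB.Nodup) (hC : SC.Nodup) :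
    SB.foldl (fun r x => if PySem.Set.contains SC x then PySem.Set.add r x else r)
      (SA.foldl (fun r x => if PySem.Set.contains SB x || PySem.Set.contains SC x then PySem.Set.add r x else r) PySem.Set.empty)
      = PySem.Set.ofList
          ((PySem.Dict.counter (SA ++ (SB ++ SC))).keys.filter
            (fun x => 2 ≤ (PySem.Dict.counter (SA ++ (SB ++ SC))).getD x 0)) := by
  rw [foldl_add_if_filter _ SA _ hA]
  rw [foldl_add_if_filter _ SB _ hB]
  simp only [PySem.Dict.keys_counter, PySem.Dict.getD_counter]
  rw [PySem.Set.ofList_eq_self_of_nodup _ (List.filter_sublist.nodup (PySem.Set.nodup_ofList _))]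
  rw [PySem.Set.ofList_append, PySem.Set.update_eq_append_filter,
      PySem.Set.ofList_append, PySem.Set.update_eq_append_filter,
      PySem.Set.ofList_eq_self_of_nodup _ hA, PySem.Set.ofList_eq_self_of_nodup _ hB,
      PySem.Set.ofList_eq_self_of_nodup _ hC]
  simp only [List.filter_append, List.filter_filter, PySem.Set.empty, List.nil_append,
    List.contains_nil, Bool.not_false, Bool.and_true, PySem.Set.contains_eq_listContains]
  have hcnt : ∀ x : String, List.count x (SA ++ (SB ++ SC)) = SA.count x + SB.count x + SC.count x := by
    intro x; rw [List.count_append, List.count_append]; omega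
  have e1 : List.filter (fun x => SB.contains x || SC.contains x) SA
      = List.filter (fun x => decide (2 ≤ (↑(List.count x (SA ++ (SB ++ SC))) : Int))) SA := by
    apply List.filter_congr
    intro x hx
    have ha1 : SA.count x = 1 := count_one SA hA x hx
    by_cases hb : x ∈ SB <;> by_cases hc : x ∈ SC <;>
      simp [hcnt, ha1, hb, hc, count_one SB hB x, count_one SC hC x,
        List.count_eq_zero_of_not_mem]
  have e2 : List.filter (fun x => SC.contains x &&
        !(List.filter (fun x => SB.contains x || SC.contains x) SA).contains x) SB
      = List.filter (fun x => decide (2 ≤ (↑(List.count x (SA ++ (SB ++ SC))) : Int)) && !SA.contains x) SB := by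
    apply List.filter_congr
    intro x hx
    have hb1 : SB.count x = 1 := count_one SB hB x hx
    by_cases ha : x ∈ SA <;> by_cases hc : x ∈ SC <;>
      simp [hcnt, hb1, ha, hc, hx, count_one SA hA x, count_one SC hC x,
        List.count_eq_zero_of_not_mem, List.mem_filter]
  have e3 : List.filter (fun x => decide (2 ≤ (↑(List.count x (SA ++ (SB ++ SC))) : Int)) &&
        (!SA.contains x && !SB.contains x)) SC = [] := by
    rw [List.filter_eq_nil_iff]
    intro x hxC
    have hc1 : SC.count x = 1 := count_one SC hC x hxC
    by_cases ha : x ∈ SA <;> by_cases hb : x ∈ SB <;>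
      simp [hcnt, hc1, ha, hb, count_one SA hA x, count_one SB hB x,
        List.count_eq_zero_of_not_mem]
  rw [e2, e1, e3, List.append_nil]

theorem main_eq (A B C : List String) : commmonStrings A B C = commmonStrings_alt A B C := by
  have hc : ([A, B, C].foldl (fun d lst =>
      (PySem.Set.ofList (lst.map PySem.Str.lower)).foldl
        (fun d x => d.insert x (d.getD x 0 + 1)) d) PySem.Dict.empty)
      = PySem.Dict.counter (PySem.Set.ofList (A.map PySem.Str.lower) ++
          (PySem.Set.ofList (B.map PySem.Str.lower) ++ PySem.Set.ofList (C.map PySem.Str.lower))) := by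
    simp only [List.foldl_cons, List.foldl_nil]
    rw [← List.foldl_append, ← List.foldl_append, PySem.Dict.foldl_insert_getD_add_one_eq_counter]
  have h1 : commmonStrings_alt A B C
      = (fun d : PySem.Dict String Int =>
          PySem.Set.ofList (d.keys.filter (fun x => 2 ≤ d.getD x 0)))
        (PySem.Dict.counter (PySem.Set.ofList (A.map PySem.Str.lower) ++
          (PySem.Set.ofList (B.map PySem.Str.lower) ++ PySem.Set.ofList (C.map PySem.Str.lower)))) := by
    rw [commmonStrings_alt]
    exact congrArg (fun d : PySem.Dict String Int =>
      PySem.Set.ofList (d.keys.filter (fun x => 2 ≤ d.getD x 0))) hc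
  rw [h1]
  have h2 : commmonStrings A B C
      = (PySem.Set.ofList (B.map PySem.Str.lower)).foldl
          (fun r x => if PySem.Set.contains (PySem.Set.ofList (C.map PySem.Str.lower)) x then PySem.Set.add r x else r)
          ((PySem.Set.ofList (A.map PySem.Str.lower)).foldl
            (fun r x => if PySem.Set.contains (PySem.Set.ofList (B.map PySem.Str.lower)) x
                || PySem.Set.contains (PySem.Set.ofList (C.map PySem.Str.lower)) x
              then PySem.Set.add r x else r) PySem.Set.empty) := by
    rw [commmonStrings]
    rw [← PySem.Set.update_map_eq_foldl_add, ← PySem.Set.update_map_eq_foldl_add,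
        ← PySem.Set.update_map_eq_foldl_add]
    rw [PySem.Set.update_empty, PySem.Set.update_empty, PySem.Set.update_empty]
  rw [h2]
  exact core_eq _ _ _ (PySem.Set.nodup_ofList _) (PySem.Set.nodup_ofList _) (PySem.Set.nodup_ofList _)

-- ===== VERDICT (by name: the statement is the Claim_ definition above) =====
theorem commmonStrings_spec : Claim_equal_commmonStrings := by
  intro A B C _
  exact main_eq A B C
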